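-- pv_equiv track=rewrite | github.com/yujiangsheng/Lean_Agent | src/llm_agent.py | select_premises
-- ===== SOURCE A (Python) =====
-- from typing import List, Optional, Dict, Any
--
-- def select_premises(
--
--     goal: str,
--     candidate_premises: List[str],
--     k: int = 10
-- ) -> List[str]:
--     """Mock 引理选择"""
--     # 简单的关键词匹配
--     selected = []
--     goal_lower = goal.lower()
--
--     for premise in candidate_premises:
--         premise_lower = premise.lower()
--         # 如果引理名包含目标中的关键词
--         for keyword in ['add', 'mul', 'comm', 'assoc', 'zero', 'one']:
--             if keyword in goal_lower and keyword in premise_lower: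
--                 selected.append(premise)
--                 break
--
--     # 补充其他引理
--     for premise in candidate_premises:
--         if premise not in selected:
--             selected.append(premise)
--
--     return selected[:k]
-- ===== SOURCE B (Python) =====
-- KEYWORDS = ['add', 'mul', 'comm', 'assoc', 'zero', 'one']
--
-- def select_premises(goal, candidate_premises, k=10):
--     goal_lower = goal.lower()
--     goal_keys = [kw for kw in KEYWORDS if kw in goal_lower]
--     matched = []
--     unmatched = []
--     seen = set()
--     for premise in candidate_premises:
--         premise_lower = premise.lower()
--         if any(kw in premise_lower for kw in goal_keys):
--             matched.append(premise)
--         elif premise not in seen: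
--             seen.add(premise)
--             unmatched.append(premise)
--     return (matched + unmatched)[:k]
-- ===== Notes on version B (the rewrite author's own statement) =====
-- stated objective: faster
-- what changed: B replaces A's two full scans (match-scan, then a second scan with an O(n) membership test against the growing result list) by a single partitioning pass into matched/unmatched accumulators with an O(1)-lookup seen-set for dedup, computing the goal's relevant keywords once up front.
import Mathlib
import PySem

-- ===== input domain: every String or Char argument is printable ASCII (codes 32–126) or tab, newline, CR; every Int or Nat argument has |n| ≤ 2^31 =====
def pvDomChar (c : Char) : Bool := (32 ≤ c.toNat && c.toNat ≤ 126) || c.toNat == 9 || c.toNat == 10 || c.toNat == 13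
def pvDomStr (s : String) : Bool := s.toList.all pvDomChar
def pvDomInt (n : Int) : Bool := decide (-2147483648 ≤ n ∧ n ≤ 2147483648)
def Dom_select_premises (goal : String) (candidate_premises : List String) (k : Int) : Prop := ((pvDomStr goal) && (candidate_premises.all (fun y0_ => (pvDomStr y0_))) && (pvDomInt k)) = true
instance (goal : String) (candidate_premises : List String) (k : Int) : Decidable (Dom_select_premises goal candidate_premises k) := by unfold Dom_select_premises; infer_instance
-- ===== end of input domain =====

-- B partitions candidate_premises in ONE pass (matched kept with duplicates, unmatched
-- deduplicated via a seen-set), with the goal's relevant keywords computed once up front,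
-- instead of A's two full scans with a membership test over the growing result (objective: alternative).


-- ===== PORT A =====
def spKeywords : List String := ["add", "mul", "comm", "assoc", "zero", "one"]

-- the inner 'for keyword … break' appends once iff some keyword satisfies the test
def select_premises (goal : String) (candidate_premises : List String) (k : Int) : List String :=
  let goal_lower := PySem.Str.lower goal
  let selected : List String := candidate_premises.foldl (fun selected premise =>
    let premise_lower := PySem.Str.lower premise
    if spKeywords.any (fun kw => PySem.Str.isIn kw goal_lower && PySem.Str.isIn kw premise_lower)
    then selected ++ [premise] else selected) []
  let selected : List String := candidate_premises.foldl (fun selected premise =>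
    if premise ∈ selected then selected else selected ++ [premise]) selected
  PySem.List.slice selected none (some k)

-- ===== PORT B =====
def select_premises_alt (goal : String) (candidate_premises : List String) (k : Int) : List String :=
  let goal_lower := PySem.Str.lower goal
  let goal_keys := spKeywords.filter (fun kw => PySem.Str.isIn kw goal_lower)
  let acc : List String × List String × PySem.Set String :=
    candidate_premises.foldl (fun acc premise =>
      let premise_lower := PySem.Str.lower premise
      if goal_keys.any (fun kw => PySem.Str.isIn kw premise_lower)
      then (acc.1 ++ [premise], acc.2.1, acc.2.2)
      else if PySem.Set.contains acc.2.2 premise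
      then acc
      else (acc.1, acc.2.1 ++ [premise], PySem.Set.add acc.2.2 premise))
      ([], [], PySem.Set.empty)
  PySem.List.slice (acc.1 ++ acc.2.1) none (some k)

-- ===== PRECONDITION & SPEC =====
def Spec_select_premises (goal : String) (candidate_premises : List String) (k : Int) (out : List String) : Prop := out = select_premises_alt goal candidate_premises k
instance (goal : String) (candidate_premises : List String) (k : Int) (out : List String) : Decidable (Spec_select_premises goal candidate_premises k out) := by unfold Spec_select_premises; infer_instance

-- ===== CLAIM (what is proved, stated in full; the proofs are below) =====
def Claim_equal_select_premises : Prop := ∀ (goal : String) (candidate_premises : List String) (k : Int), Dom_select_premises goal candidate_premises k → Spec_select_premises goal candidate_premises k (select_premises goal candidate_premises k)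

-- ===== LEMMAS AND PROOFS =====

-- the premise-matching test, with the goal string fixed
def spMatch (gl : String) (p : String) : Bool :=
  spKeywords.any (fun kw => PySem.Str.isIn kw gl && PySem.Str.isIn kw (PySem.Str.lower p))

-- filtering the keywords by the goal first gives the same test
theorem spMatch_eq_filter_any (gl p : String) :
    (spKeywords.filter (fun kw => PySem.Str.isIn kw gl)).any
      (fun kw => PySem.Str.isIn kw (PySem.Str.lower p)) = spMatch gl p := by
  simp [spMatch, List.any_filter]

-- B's single fold splits into "matched = filter" and the unmatched/seen fold
def spUnFold (gl : String) (l : List String) (u : List String) (s : PySem.Set String) :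
    List String × PySem.Set String :=
  l.foldl (fun acc premise =>
    if spMatch gl premise then acc
    else if PySem.Set.contains acc.2 premise then acc
    else (acc.1 ++ [premise], PySem.Set.add acc.2 premise)) (u, s)

theorem foldB_eq (gl : String) (l : List String) (m u : List String) (s : PySem.Set String) :
    (l.foldl (fun acc premise =>
        if spMatch gl premise
        then (acc.1 ++ [premise], acc.2.1, acc.2.2)
        else if PySem.Set.contains acc.2.2 premise
        then acc
        else (acc.1, acc.2.1 ++ [premise], PySem.Set.add acc.2.2 premise))
      (m, u, s))
    = (m ++ l.filter (spMatch gl), spUnFold gl l u s) := by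
  induction l generalizing m u s with
  | nil => simp [spUnFold]
  | cons p l ih =>
    rw [List.foldl_cons]
    by_cases hm : spMatch gl p = true
    · rw [if_pos hm, ih]
      simp [spUnFold, List.foldl_cons, hm]
    · rw [if_neg (by simp [hm])]
      by_cases hc : PySem.Set.contains s p = true
      · rw [if_pos hc, ih]
        simp only [spUnFold, List.foldl_cons, hm, Bool.false_eq_true, if_false, if_pos hc]
        simp [hm]
      · have hns : p ∉ s := fun h => hc ((PySem.Set.contains_iff s p).mpr h)
        rw [if_neg hc, ih]
        simp only [spUnFold, List.foldl_cons, hm, Bool.false_eq_true, if_false, if_neg hc]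
        simp [hm, hns]

-- A's second loop, started from the full matched prefix, computes the same unmatched tail
theorem foldA2_eq (gl : String) (cps : List String) (l : List String)
    (hl : ∀ p ∈ l, p ∈ cps) (u : List String) (s : PySem.Set String)
    (hs : ∀ p, PySem.Set.contains s p = true ↔ p ∈ u)
    (hu : ∀ p ∈ u, spMatch gl p = false) :
    l.foldl (fun selected premise =>
        if premise ∈ selected then selected else selected ++ [premise])
      (cps.filter (spMatch gl) ++ u)
    = cps.filter (spMatch gl) ++ (spUnFold gl l u s).1 := by
  induction l generalizing u s with
  | nil => simp [spUnFold]
  | cons p l ih =>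
    have hp : p ∈ cps := hl p (by simp)
    have hl' : ∀ q ∈ l, q ∈ cps := fun q hq => hl q (by simp [hq])
    by_cases hm : spMatch gl p
    · have hmem : p ∈ cps.filter (spMatch gl) ++ u := by
        simp [List.mem_filter, hp, hm]
      simp only [spUnFold, List.foldl_cons, hm, if_pos hmem, if_true]
      exact ih hl' u s hs hu
    · have hnm : p ∉ cps.filter (spMatch gl) := by
        simp [List.mem_filter, hm]
      by_cases hpu : p ∈ u
      · have hmem : p ∈ cps.filter (spMatch gl) ++ u := by simp [hpu]
        have hcs : PySem.Set.contains s p = true := (hs p).mpr hpu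
        simp only [spUnFold, List.foldl_cons, hm, if_pos hmem, hcs, Bool.false_eq_true,
          if_false, if_true]
        exact ih hl' u s hs hu
      · have hmem : p ∉ cps.filter (spMatch gl) ++ u := by
          simp [hpu, hnm]
        have hcs : PySem.Set.contains s p = false := by
          by_contra h
          exact hpu ((hs p).mp (by simpa using h))
        have hs' : ∀ q, PySem.Set.contains (PySem.Set.add s p) q = true ↔ q ∈ u ++ [p] := by
          intro q
          rw [PySem.Set.contains_iff, PySem.Set.mem_add]
          simp [← hs q, or_comm]
        have hu' : ∀ q ∈ u ++ [p], spMatch gl q = false := by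
          intro q hq
          rcases List.mem_append.mp hq with h | h
          · exact hu q h
          · simp at h; subst h; simpa using hm
        simp only [spUnFold, List.foldl_cons, hm, if_neg hmem, hcs, Bool.false_eq_true,
          if_false, List.append_assoc]
        exact ih hl' (u ++ [p]) (PySem.Set.add s p) hs' hu'

-- ===== VERDICT (by name: the statement is the Claim_ definition above) =====
theorem select_premises_spec : Claim_equal_select_premises := by
  intro goal cps k _
  unfold Spec_select_premises select_premises select_premises_alt
  dsimp only
  set gl := PySem.Str.lower goal with hgl
  have h1 : cps.foldl (fun selected premise =>
      if spKeywords.any (fun kw => PySem.Str.isIn kw gl && PySem.Str.isIn kw (PySem.Str.lower premise))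
      then selected ++ [premise] else selected) ([] : List String)
      = [] ++ cps.filter (spMatch gl) :=
    PySem.List.foldl_append_if_eq_filter (p := fun premise => spMatch gl premise) cps []
  rw [List.nil_append] at h1
  have hA2 := foldA2_eq gl cps cps (fun p hp => hp) [] PySem.Set.empty
      (by intro p; simp [PySem.Set.empty]) (by intro p hp; simp at hp)
  rw [List.append_nil] at hA2
  have hfun : (fun (acc : List String × List String × PySem.Set String) premise =>
        if (spKeywords.filter (fun kw => PySem.Str.isIn kw gl)).any
            (fun kw => PySem.Str.isIn kw (PySem.Str.lower premise))
        then (acc.1 ++ [premise], acc.2.1, acc.2.2)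
        else if PySem.Set.contains acc.2.2 premise
        then acc
        else (acc.1, acc.2.1 ++ [premise], PySem.Set.add acc.2.2 premise))
      = (fun (acc : List String × List String × PySem.Set String) premise =>
        if spMatch gl premise
        then (acc.1 ++ [premise], acc.2.1, acc.2.2)
        else if PySem.Set.contains acc.2.2 premise
        then acc
        else (acc.1, acc.2.1 ++ [premise], PySem.Set.add acc.2.2 premise)) := by
    funext acc premise; rw [spMatch_eq_filter_any]
  rw [h1, hA2, hfun, foldB_eq]
  simp
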